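-- pv_equiv track=rewrite | github.com/uhh-lt/cam | src/Backend/db/conll_file_creator.py | beginning_of_part
-- ===== SOURCE A (Python) =====
-- SPACE = ' '
--
-- def equals_part(token, part):
--     return token == part
--
-- def beginning_of_part(token, part, tokens, index):
--     if part.startswith(token) and len(part) > len(token):
--         expanding_token = token
--         i = 1
--         while index + i < len(tokens):
--             expanding_token += SPACE + tokens[index + i]
--             if equals_part(expanding_token, part):
--                 return True
--             if not part.startswith(expanding_token):
--                 return False
--             if not len(part) > len(expanding_token):
--                 return False
--             i += 1
--     return False
-- ===== SOURCE B (Python) =====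
-- SPACE = ' '
--
-- def beginning_of_part(token, part, tokens, index):
--     n = len(part)
--     if not part.startswith(token) or n <= len(token):
--         return False
--     pos = len(token)
--     for t in tokens[index + 1:]:
--         new_pos = pos + 1 + len(t)
--         if new_pos > n or part[pos:new_pos] != SPACE + t:
--             return False
--         if new_pos == n:
--             return True
--         pos = new_pos
--     return False
-- ===== Notes on version B (the rewrite author's own statement) =====
-- stated objective: alternative
-- what changed: B makes a single pass over tokens[index+1:] keeping only an integer offset into part and comparing each newly appended token's slice of part, instead of rebuilding the growing expanding_token and re-comparing its entire prefix against part on every iteration.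
-- outside the precondition, e.g. on beginning_of_part('a', 'a b c', ['c', 'b'], -2): A returns True, B returns False; on beginning_of_part('a', 'a b', ['b'], -5): A raises IndexError, B returns True
import Mathlib
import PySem

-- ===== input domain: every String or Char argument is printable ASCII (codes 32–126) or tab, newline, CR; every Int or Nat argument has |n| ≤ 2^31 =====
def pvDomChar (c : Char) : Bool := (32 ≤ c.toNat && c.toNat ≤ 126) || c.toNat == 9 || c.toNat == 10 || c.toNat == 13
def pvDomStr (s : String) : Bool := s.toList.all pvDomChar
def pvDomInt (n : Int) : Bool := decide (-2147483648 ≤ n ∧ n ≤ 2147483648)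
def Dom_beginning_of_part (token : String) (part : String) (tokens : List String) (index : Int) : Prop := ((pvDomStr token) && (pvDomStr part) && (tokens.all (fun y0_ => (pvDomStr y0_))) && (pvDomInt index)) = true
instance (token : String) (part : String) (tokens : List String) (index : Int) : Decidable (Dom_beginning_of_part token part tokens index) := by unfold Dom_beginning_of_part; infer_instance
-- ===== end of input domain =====

-- B makes a single pass over tokens[index+1:] keeping only an offset into part, instead of
-- rebuilding the growing expanding_token and re-comparing its whole prefix each step (objective: alternative).
-- Both ports work on .toList of the string arguments (PySem.Chars are the exact Python string semantics).

-- ===== PORT A =====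
-- SPACE = ' '
def pvSPACE : List Char := [' ']

-- def equals_part(token, part): return token == part
def equalsPart (token part : List Char) : Bool := token == part

-- the 'while index + i < len(tokens)' loop; fuel bounds the iteration count
def bopLoop (part : List Char) (tokens : List (List Char)) (index : Int) :
    List Char → Int → Nat → Bool
  | _, _, 0 => false
  | expanding, i, fuel+1 =>
    if index + i < (tokens.length : Int) then
      match PySem.List.pyGet? tokens (index + i) with
      | none => false  -- IndexError in Python (excluded by Pre_)
      | some t =>
        let expanding2 := expanding ++ pvSPACE ++ t
        if equalsPart expanding2 part then true
        else if !(PySem.Chars.startswith part expanding2) then false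
        else if !(decide (part.length > expanding2.length)) then false
        else bopLoop part tokens index expanding2 (i+1) fuel
    else false

def beginning_of_part (token : String) (part : String) (tokens : List String) (index : Int) : Bool :=
  let partL := part.toList
  let tokensL := tokens.map String.toList
  if PySem.Chars.startswith partL token.toList && decide (partL.length > token.toList.length) then
    bopLoop partL tokensL index token.toList 1 ((tokensL.length : Int) - index).toNat
  else false

-- ===== PORT B =====
-- the 'for t in tokens[index+1:]' loop of Source B, carrying the offset pos into part
def altLoop (part : List Char) (n : Nat) : List (List Char) → Nat → Bool
  | [], _ => false
  | t :: ts, pos =>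
    let newPos := pos + 1 + t.length
    if decide (newPos > n) || !(PySem.Chars.slice part (some (pos : Int)) (some (newPos : Int)) == pvSPACE ++ t) then false
    else if newPos == n then true
    else altLoop part n ts newPos

def beginning_of_part_alt (token : String) (part : String) (tokens : List String) (index : Int) : Bool :=
  let partL := part.toList
  let n := partL.length
  if !(PySem.Chars.startswith partL token.toList) || decide (n ≤ token.toList.length) then false
  else altLoop partL n (PySem.List.slice (tokens.map String.toList) (some (index + 1)) none) token.toList.length

-- ===== PRECONDITION & SPEC =====
-- Pre_ excludes loop-entered calls with index+1 < 0, which lie outside the function's natural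
-- domain of token positions: there A's step-by-step negative indexing (wraparound, re-reading
-- tokens from the end and then again from the start) and B's tail slice tokens[index+1:] are
-- different defensible readings of "the tokens after position index", and for index+1 < -len(tokens)
-- A raises IndexError.
def Pre_beginning_of_part (token : String) (part : String) (tokens : List String) (index : Int) : Prop :=
  (PySem.Str.startswith part token = true ∧ token.toList.length < part.toList.length ∧ index + 1 < (tokens.length : Int)) → 0 ≤ index + 1
instance (token : String) (part : String) (tokens : List String) (index : Int) : Decidable (Pre_beginning_of_part token part tokens index) := by unfold Pre_beginning_of_part; infer_instance

def pvWitness_beginning_of_part : String × String × List String × Int := ("a", "a b", ["b"], 0)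

def Spec_beginning_of_part (token : String) (part : String) (tokens : List String) (index : Int) (out : Bool) : Prop := out = beginning_of_part_alt token part tokens index
instance (token : String) (part : String) (tokens : List String) (index : Int) (out : Bool) : Decidable (Spec_beginning_of_part token part tokens index out) := by unfold Spec_beginning_of_part; infer_instance

-- ===== CLAIM (what is proved, stated in full; the proofs are below) =====
def Claim_equal_beginning_of_part : Prop := ∀ (token : String) (part : String) (tokens : List String) (index : Int), Dom_beginning_of_part token part tokens index → Pre_beginning_of_part token part tokens index → Spec_beginning_of_part token part tokens index (beginning_of_part token part tokens index)


-- ===== LEMMAS AND PROOFS =====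

-- expanding is a prefix of part ⇒ appending u stays a prefix iff u equals the next slice of part
lemma prefix_step (part expanding u : List Char) (h : expanding <+: part) :
    (expanding ++ u <+: part) ↔ (part.drop expanding.length).take u.length = u := by
  obtain ⟨r, hr⟩ := h
  subst hr
  rw [List.prefix_append_right_inj, List.drop_left]
  constructor
  · intro hu; exact (List.prefix_iff_eq_take.mp hu).symm
  · intro hu; exact List.prefix_iff_eq_take.mpr hu.symm

-- a prefix of equal length is equality
lemma prefix_eq_of_length (u v : List Char) (h : u <+: v) (hl : u.length = v.length) : u = v := by
  obtain ⟨r, hr⟩ := h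
  have hlr := congrArg List.length hr
  simp at hlr
  have : r = [] := List.length_eq_zero_iff.mp (by omega)
  simpa [this] using hr

-- the two loops agree, tracked by the absolute position j = index + i into tokens
lemma loop_eq (part : List Char) (tokens : List (List Char)) (index : Int) :
    ∀ (fuel : Nat) (j : Nat) (i : Int) (expanding : List Char),
      index + i = (j : Int) →
      expanding <+: part → expanding.length < part.length →
      tokens.length ≤ j + fuel →
      bopLoop part tokens index expanding i fuel
        = altLoop part part.length (tokens.drop j) expanding.length := by
  intro fuel
  induction fuel with
  | zero =>
    intro j i expanding _ _ _ hfuel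
    have hd : tokens.drop j = [] := List.drop_eq_nil_of_le (by omega)
    simp [bopLoop, hd, altLoop]
  | succ fuel ih =>
    intro j i expanding h hpre hlen hfuel
    by_cases hj : j < tokens.length
    · -- one real iteration on both sides
      have hdrop : tokens.drop j = tokens[j] :: tokens.drop (j + 1) :=
        List.drop_eq_getElem_cons hj
      rw [hdrop]
      simp only [bopLoop, altLoop, equalsPart]
      rw [h, if_pos (show (j : Int) < (tokens.length : Int) by exact_mod_cast hj)]
      rw [PySem.List.pyGet?_natCast, List.getElem?_eq_getElem hj]
      set t := tokens[j] with ht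
      -- the slice B compares is exactly the next |t| + 1 chars of part
      have hslice : PySem.Chars.slice part (some (expanding.length : Int))
            (some ((expanding.length + 1 + t.length : Nat) : Int))
          = (part.drop expanding.length).take (t.length + 1) := by
        rw [PySem.Chars.slice_eq_listSlice, PySem.List.slice_natCast]
        congr 1
        omega
      rw [hslice]
      have hps : (expanding ++ (' ' :: t) <+: part) ↔
          (part.drop expanding.length).take (t.length + 1) = ' ' :: t := by
        simpa using prefix_step part expanding (' ' :: t) hpre
      by_cases hP : expanding ++ (' ' :: t) <+: part
      · have htake := hps.mp hP
        have hlePart : expanding.length + 1 + t.length ≤ part.length := by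
          have h1 := congrArg List.length htake
          have h2 := List.length_drop (l := part) (i := expanding.length)
          simp at h1
          omega
        have hswb : PySem.Chars.startswith part (expanding ++ (' ' :: t)) = true :=
          (PySem.Chars.startswith_iff _ _).mpr hP
        by_cases heq : expanding.length + 1 + t.length = part.length
        · -- the part is completed: both return true
          have hfull : expanding ++ (' ' :: t) = part :=
            prefix_eq_of_length _ _ hP (by simp; omega)
          simp [pvSPACE, hfull, htake, heq]
        · -- strict prefix: both recurse
          have hne : ¬ (expanding ++ (' ' :: t) = part) := by
            intro hc
            have := congrArg List.length hc
            simp at this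
            omega
          have hrec := ih (j + 1) (i + 1) (expanding ++ pvSPACE ++ t)
            (by omega) (by simpa [pvSPACE] using hP) (by simp [pvSPACE]; omega) (by omega)
          have hleF : ¬ (part.length ≤ expanding.length + (t.length + 1)) := by omega
          have hltF : ¬ (part.length < expanding.length + 1 + t.length) := by omega
          simp [pvSPACE, hne, hswb, htake, hleF, hltF, heq]
          calc bopLoop part tokens index (expanding ++ ' ' :: t) (i + 1) fuel
              = altLoop part part.length (List.drop (j + 1) tokens)
                  (expanding.length + (t.length + 1)) := by simpa [pvSPACE] using hrec
            _ = altLoop part part.length (List.drop (j + 1) tokens)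
                  (expanding.length + 1 + t.length) := by rw [Nat.add_comm t.length 1, Nat.add_assoc]
      · -- mismatch: both return false
        have htake : ¬ ((part.drop expanding.length).take (t.length + 1) = ' ' :: t) :=
          fun hc => hP (hps.mpr hc)
        have hne : ¬ (expanding ++ (' ' :: t) = part) := by
          intro hc; exact hP (hc ▸ List.prefix_refl part)
        have hswb : PySem.Chars.startswith part (expanding ++ (' ' :: t)) = false := by
          rw [← Bool.not_eq_true, PySem.Chars.startswith_iff]; exact hP
        simp [pvSPACE, hne, hswb, htake]
    · -- loop bound reached: both return false
      have hd : tokens.drop j = [] := List.drop_eq_nil_of_le (by omega)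
      rw [bopLoop, h, hd]
      rw [if_neg (by exact_mod_cast hj)]
      simp [altLoop]

-- ===== VERDICT (by name: the statement is the Claim_ definition above) =====
theorem beginning_of_part_spec : Claim_equal_beginning_of_part := by
  intro token part tokens index _ hpre
  unfold Spec_beginning_of_part beginning_of_part beginning_of_part_alt
  by_cases hsw : PySem.Chars.startswith part.toList token.toList = true
  · by_cases hlen : token.toList.length < part.toList.length
    · -- the loop is reached on both sides
      have h0 : 0 ≤ index + 1 := by
        by_cases hix : index + 1 < (tokens.length : Int)
        · exact hpre ⟨by simpa using hsw, hlen, by simpa using hix⟩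
        · omega
      have hslice : PySem.List.slice (tokens.map String.toList) (some (index + 1)) none
          = (tokens.map String.toList).drop (index + 1).toNat :=
        PySem.List.slice_from _ h0
      have hmain := loop_eq part.toList (tokens.map String.toList) index
        ((tokens.length : Int) - index).toNat (index + 1).toNat 1 token.toList
        (by omega) ((PySem.Chars.startswith_iff _ _).mp hsw) hlen (by simp; omega)
      have hlt : token.length < part.length := by simpa using hlen
      have hleF : ¬ (part.length ≤ token.length) := by omega
      simp [hsw, hslice, hmain, hlt, hleF]
    · have hlt : ¬ (token.length < part.length) := by simpa using hlen
      have hle : part.length ≤ token.length := by omega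
      simp [hsw, hlt, hle]
  · simp [Bool.not_eq_true] at hsw
    simp [hsw]
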